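-- pv_equiv track=rewrite | github.com/AiZhanghan/Leetcode | 秋招/360/4.py | func
-- ===== SOURCE A (Python) =====
-- from collections import deque
--
-- def func(N, ops):
--     """
--     Args:
--         N: int
--         ops: list[int]
--
--     Return:
--         deque
--     """
--     odd = deque([x for x in range(1, N + 1, 2)])
--     even = deque([x for x in range(2, N + 1, 2)])
--
--     for op in ops:
--         if op == 1:
--             temp = odd.popleft()
--             odd.append(temp)
--         odd, even = even, odd
--     res = []
--     for i in range(len(odd)):
--         res.append(odd[i])
--         res.append(even[i])
--     return res
-- ===== SOURCE B (Python) =====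
-- # B: instead of simulating the ops one by one with rotate-then-swap on two deques,
-- # count the rotations that land on each half in one enumerate pass, apply each as a
-- # single slice rotation, pick the final orientation from len(ops)'s parity, and
-- # interleave with zip.
-- def func(N, ops):
--     odd0 = list(range(1, N + 1, 2))
--     even0 = list(range(2, N + 1, 2))
--     r_odd = sum(1 for i, op in enumerate(ops) if i % 2 == 0 and op == 1)
--     r_even = sum(1 for i, op in enumerate(ops) if i % 2 == 1 and op == 1)
--
--     def rot(xs, r):
--         if not xs:
--             return xs
--         k = r % len(xs)
--         return xs[k:] + xs[:k]
--
--     odd0 = rot(odd0, r_odd)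
--     even0 = rot(even0, r_even)
--     a, b = (odd0, even0) if len(ops) % 2 == 0 else (even0, odd0)
--     return [x for p in zip(a, b) for x in p]
-- ===== Notes on version B (the rewrite author's own statement) =====
-- stated objective: alternative
-- what changed: Replaces the per-op deque rotate-and-swap simulation by one counting pass (rotations landing on each half, by index parity), a single slice-based bulk rotation per half, parity of len(ops) for the final orientation, and a zip interleave.
import Mathlib
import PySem

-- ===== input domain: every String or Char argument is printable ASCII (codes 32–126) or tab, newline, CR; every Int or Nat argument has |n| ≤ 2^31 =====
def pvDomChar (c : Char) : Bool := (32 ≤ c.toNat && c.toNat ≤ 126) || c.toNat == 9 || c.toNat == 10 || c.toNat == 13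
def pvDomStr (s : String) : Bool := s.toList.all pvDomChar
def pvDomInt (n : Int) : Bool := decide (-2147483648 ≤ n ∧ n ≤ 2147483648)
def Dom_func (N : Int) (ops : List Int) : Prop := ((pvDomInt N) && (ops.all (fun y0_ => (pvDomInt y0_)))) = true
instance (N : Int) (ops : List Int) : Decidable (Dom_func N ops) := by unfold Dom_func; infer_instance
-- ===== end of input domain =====

-- B replaces A's per-op rotate-and-swap deque simulation by counting the rotations per half,
-- one bulk slice rotation per half, and a zip interleave (alternative decomposition, same cost).
-- Equivalence is about the return value; neither side mutates its arguments observably.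

-- ===== PORT A =====
-- loop body 'temp = odd.popleft(); odd.append(temp)': on the empty deque Python raises
-- IndexError (excluded by Pre_); the port returns [] there.
def rotA1 (l : List Int) : List Int :=
  match l with
  | [] => []
  | x :: xs => xs ++ [x]

def func (N : Int) (ops : List Int) : List Int :=
  let odd := PySem.List.pyRange 1 (N + 1) 2
  let even := PySem.List.pyRange 2 (N + 1) 2
  let p := ops.foldl (fun (s : List Int × List Int) op =>
      let odd' := if op = 1 then rotA1 s.1 else s.1
      (s.2, odd')) (odd, even)
  -- 'for i in range(len(odd)): res.append(odd[i]); res.append(even[i])' — even[i] raises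
  -- IndexError when len(even) < len(odd) (excluded by Pre_); the port reads the default 0 there.
  (List.range p.1.length).foldl (fun res i => res ++ [p.1.getD i 0, p.2.getD i 0]) []

-- ===== PORT B =====
-- Source B's nested helper rot(xs, r)
def rotB (xs : List Int) (r : Int) : List Int :=
  if xs.length = 0 then xs
  else
    let k := PySem.Int.mod r (xs.length : Int)
    PySem.List.slice xs (some k) none ++ PySem.List.slice xs none (some k)

def func_alt (N : Int) (ops : List Int) : List Int :=
  let odd0 := PySem.List.pyRange 1 (N + 1) 2
  let even0 := PySem.List.pyRange 2 (N + 1) 2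
  let rOdd : Int := ((PySem.List.enumerate ops 0).countP
      (fun p => PySem.Int.mod p.1 2 == 0 && p.2 == 1) : Nat)
  let rEven : Int := ((PySem.List.enumerate ops 0).countP
      (fun p => PySem.Int.mod p.1 2 == 1 && p.2 == 1) : Nat)
  let odd1 := rotB odd0 rOdd
  let even1 := rotB even0 rEven
  let ab := if PySem.Int.mod (ops.length : Int) 2 = 0 then (odd1, even1) else (even1, odd1)
  (ab.1.zip ab.2).flatMap (fun p => [p.1, p.2])

-- ===== PRECONDITION & SPEC =====
-- Pre_ excludes exactly the inputs where A raises IndexError: a rotation of an empty half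
-- (an op==1 at an even index with N < 1, or at an odd index with N < 2) and the interleave
-- overrun (N odd and len(ops) even, so the odd half is one longer than the even half).
def Pre_func (N : Int) (ops : List Int) : Prop :=
  ((∃ k < ops.length, k % 2 = 0 ∧ ops.getD k 0 = 1) → 1 ≤ N) ∧
  ((∃ k < ops.length, k % 2 = 1 ∧ ops.getD k 0 = 1) → 2 ≤ N) ∧
  ¬(1 ≤ N ∧ N % 2 = 1 ∧ ops.length % 2 = 0)
instance (N : Int) (ops : List Int) : Decidable (Pre_func N ops) := by
  unfold Pre_func; infer_instance

def pvWitness_func : Int × List Int := (4, [1, 2])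

def Spec_func (N : Int) (ops : List Int) (out : List Int) : Prop := out = func_alt N ops
instance (N : Int) (ops : List Int) (out : List Int) : Decidable (Spec_func N ops out) := by
  unfold Spec_func; infer_instance

-- ===== CLAIM (what is proved, stated in full; the proofs are below) =====
def Claim_equal_func : Prop := ∀ (N : Int) (ops : List Int),
  Dom_func N ops → Pre_func N ops → Spec_func N ops (func N ops)

-- ===== LEMMAS AND PROOFS =====

-- n-fold single left rotation (A applies it once per op==1 hitting a half)
def rotN : Nat → List Int → List Int
  | 0, l => l
  | n + 1, l => rotN n (rotA1 l)

-- cnt b ops: number of 1s at even (b = true) resp. odd (b = false) indices of ops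
def cnt : Bool → List Int → Nat
  | _, [] => 0
  | b, op :: rest => (if b ∧ op = 1 then 1 else 0) + cnt (!b) rest

lemma rotA1_eq_rotate (l : List Int) : rotA1 l = l.rotate 1 := by
  cases l with
  | nil => simp [rotA1]
  | cons x xs =>
    rw [List.rotate_eq_drop_append_take (by simp)]
    simp [rotA1]

lemma rotN_eq_rotate (n : Nat) (l : List Int) : rotN n l = l.rotate n := by
  induction n generalizing l with
  | zero => simp [rotN]
  | succ m ih =>
    show rotN m (rotA1 l) = l.rotate (m + 1)
    rw [ih, rotA1_eq_rotate, List.rotate_rotate, Nat.add_comm]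

lemma rotB_eq_rotN (l : List Int) (c : Nat) : rotB l (c : Int) = rotN c l := by
  by_cases h : l.length = 0
  · have : l = [] := List.length_eq_zero_iff.mp h
    subst this
    simp [rotB, rotN_eq_rotate]
  · have hlen : (l.length : Int) = ((l.length : Nat) : Int) := rfl
    simp only [rotB, if_neg h]
    rw [PySem.Int.mod_natCast c l.length,
        PySem.List.slice_from_natCast, PySem.List.slice_to_natCast,
        rotN_eq_rotate, ← List.rotate_mod,
        List.rotate_eq_drop_append_take (le_of_lt (Nat.mod_lt _ (Nat.pos_of_ne_zero h)))]

lemma length_rotN (n : Nat) (l : List Int) : (rotN n l).length = l.length := by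
  rw [rotN_eq_rotate, List.length_rotate]

-- A's loop: after folding all ops, the two halves are bulk rotations of the initial
-- halves, swapped according to the parity of len(ops).
lemma foldA (ops : List Int) (o e : List Int) :
    ops.foldl (fun (s : List Int × List Int) op =>
      let odd' := if op = 1 then rotA1 s.1 else s.1
      (s.2, odd')) (o, e)
    = if ops.length % 2 = 0
      then (rotN (cnt true ops) o, rotN (cnt false ops) e)
      else (rotN (cnt false ops) e, rotN (cnt true ops) o) := by
  induction ops generalizing o e with
  | nil => simp [cnt, rotN]
  | cons op rest ih =>
    simp only [List.foldl_cons]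
    rw [ih]
    have hc : cnt true (op :: rest) = (if op = 1 then 1 else 0) + cnt false rest := by
      simp [cnt]
    have hc' : cnt false (op :: rest) = cnt true rest := by simp [cnt]
    by_cases hp : rest.length % 2 = 0
    · have hp2 : (op :: rest).length % 2 ≠ 0 := by simp [List.length_cons]; omega
      rw [if_pos hp, if_neg hp2, hc, hc']
      by_cases h1 : op = 1
      · simp [h1, Nat.add_comm, rotN]
      · simp [h1]
    · have hp2 : (op :: rest).length % 2 = 0 := by simp [List.length_cons]; omega
      rw [if_neg hp, if_pos hp2, hc, hc']
      by_cases h1 : op = 1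
      · simp [h1, Nat.add_comm, rotN]
      · simp [h1]

-- B's counting pass equals cnt (r selects the index parity; s is the enumerate offset).
lemma countP_enumerate (r : Int) (hr : r = 0 ∨ r = 1) (ops : List Int) : ∀ s : Nat,
    ((PySem.List.enumerate ops (s : Int)).countP
      (fun p => PySem.Int.mod p.1 2 == r && p.2 == 1))
    = cnt ((s : Int) % 2 == r) ops := by
  induction ops with
  | nil => intro s; simp [PySem.List.enumerate_nil, cnt]
  | cons op rest ih =>
    intro s
    rw [PySem.List.enumerate_cons, List.countP_cons]
    have hcast : ((s : Int) + 1) = ((s + 1 : Nat) : Int) := by push_cast; ring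
    rw [hcast, ih (s + 1)]
    have hmod : PySem.Int.mod (s : Int) 2 = ((s % 2 : Nat) : Int) := by
      exact_mod_cast PySem.Int.mod_natCast s 2
    have h1 : ((s : Int) % 2) = ((s % 2 : Nat) : Int) := by push_cast; omega
    have h2 : (((s + 1 : Nat) : Int) % 2) = (((s + 1) % 2 : Nat) : Int) := by push_cast; omega
    rw [hmod, h1, h2]
    by_cases hs : s % 2 = 0
    · have hs1 : (s + 1) % 2 = 1 := by omega
      rw [hs, hs1]
      rcases hr with hr | hr <;> subst hr <;> by_cases h : op = 1 <;>
        · simp [cnt, h]; try omega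
    · have hs0 : s % 2 = 1 := by omega
      have hs1 : (s + 1) % 2 = 0 := by omega
      rw [hs0, hs1]
      rcases hr with hr | hr <;> subst hr <;> by_cases h : op = 1 <;>
        · simp [cnt, h]; try omega

-- A's index interleave equals B's zip interleave when the first list is not longer.
lemma interleave (a : List Int) : ∀ (b : List Int), a.length ≤ b.length →
    (List.range a.length).flatMap (fun i => [a.getD i 0, b.getD i 0])
    = (a.zip b).flatMap (fun p => [p.1, p.2]) := by
  induction a with
  | nil => intro b _; simp
  | cons x a' ih =>
    intro b hb
    cases b with
    | nil => simp at hb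
    | cons y b' =>
      simp only [List.length_cons, List.range_succ_eq_map, List.flatMap_cons,
        List.flatMap_map, List.zip_cons_cons]
      have : ∀ i : Nat,
          [(x :: a').getD (Nat.succ i) 0, (y :: b').getD (Nat.succ i) 0]
          = [a'.getD i 0, b'.getD i 0] := by intro i; simp
      simp only [this]
      rw [ih b' (by simpa using hb)]
      simp

-- lengths of the two halves
lemma length_halves (N : Int) (hN : -2147483648 ≤ N ∧ N ≤ 2147483648) :
    (PySem.List.pyRange 2 (N + 1) 2).length ≤ (PySem.List.pyRange 1 (N + 1) 2).length ∧
    ((PySem.List.pyRange 1 (N + 1) 2).length ≤ (PySem.List.pyRange 2 (N + 1) 2).length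
      ∨ (1 ≤ N ∧ N % 2 = 1)) := by
  rw [PySem.List.pyRange_of_pos 1 (N + 1) (by norm_num),
      PySem.List.pyRange_of_pos 2 (N + 1) (by norm_num)]
  simp only [List.length_map, List.length_range]
  constructor
  · split_ifs <;> omega
  · by_cases h : 1 ≤ N ∧ N % 2 = 1
    · exact Or.inr h
    · left; split_ifs <;> omega

-- ===== VERDICT (by name: the statement is the Claim_ definition above) =====
theorem func_spec : Claim_equal_func := by
  intro N ops hDom hPre
  unfold Spec_func func func_alt
  simp only []
  obtain ⟨-, -, hPre3⟩ := hPre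
  have hDom' : -2147483648 ≤ N ∧ N ≤ 2147483648 := by
    have := (Bool.and_eq_true _ _).mp hDom |>.1
    simpa [pvDomInt] using this
  obtain ⟨hEO, hOE⟩ := length_halves N hDom'
  rw [foldA]
  have hmod : PySem.Int.mod ((ops.length : Nat) : Int) 2 = ((ops.length % 2 : Nat) : Int) :=
    PySem.Int.mod_natCast ops.length 2
  have hr0 : ((PySem.List.enumerate ops 0).countP
      (fun p => PySem.Int.mod p.1 2 == 0 && p.2 == 1)) = cnt true ops := by
    have := countP_enumerate 0 (Or.inl rfl) ops 0
    simpa using this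
  have hr1 : ((PySem.List.enumerate ops 0).countP
      (fun p => PySem.Int.mod p.1 2 == 1 && p.2 == 1)) = cnt false ops := by
    have := countP_enumerate 1 (Or.inr rfl) ops 0
    simpa using this
  rw [hr0, hr1]
  by_cases hp : ops.length % 2 = 0
  · have hmod0 : PySem.Int.mod ((ops.length : Nat) : Int) 2 = 0 := by
      rw [hmod, hp]; rfl
    rw [if_pos hp, if_pos hmod0]
    dsimp only
    rw [rotB_eq_rotN, rotB_eq_rotN, PySem.List.foldl_append_eq_flatMap, List.nil_append]
    have hlen : (PySem.List.pyRange 1 (N + 1) 2).length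
        ≤ (PySem.List.pyRange 2 (N + 1) 2).length := by
      rcases hOE with h | h
      · exact h
      · exact absurd ⟨h.1, h.2, hp⟩ hPre3
    exact interleave _ _ (by rw [length_rotN, length_rotN]; exact hlen)
  · have hmod1 : PySem.Int.mod ((ops.length : Nat) : Int) 2 ≠ 0 := by
      rw [hmod]
      intro h
      exact hp (by exact_mod_cast h)
    rw [if_neg hp, if_neg hmod1]
    dsimp only
    rw [rotB_eq_rotN, rotB_eq_rotN, PySem.List.foldl_append_eq_flatMap, List.nil_append]
    exact interleave _ _ (by rw [length_rotN, length_rotN]; exact hEO)
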